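-- pv_equiv track=rewrite | github.com/MADHURIMA-BAG-MCA-A-2024-26-26-UEMK/PYTHON | Assignment2/serise18.py | nth_term
-- ===== SOURCE A (Python) =====
-- import string
--
-- def nth_term(n):
--     # Calculate the group number where the nth term belongs
--     group = 1
--     total_terms = 0
--
--     while total_terms + group < n:
--         total_terms += group
--         group += 1
--
--     # The character that corresponds to the group number
--     # The groups start at 1 for 'a', 2 for 'b', 3 for 'c', and so on
--     character = string.ascii_lowercase[group - 1]
--
--     return character
-- ===== SOURCE B (Python) =====
-- import math
-- import string
--
-- def nth_term(n):
--     # group = smallest g with g*(g+1)/2 >= n, via the inverse triangular formula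
--     if n <= 1:
--         group = 1
--     else:
--         group = (1 + math.isqrt(8 * n - 7)) // 2
--     return string.ascii_lowercase[group - 1]
-- ===== Notes on version B (the rewrite author's own statement) =====
-- stated objective: alternative
-- what changed: Replaced the incremental while-loop that accumulates triangular numbers by a closed-form inverse: group = (1 + isqrt(8n-7)) // 2 (clamped to 1 for n <= 1), then index ascii_lowercase once.
-- outside the precondition, e.g. on nth_term(352): A raises IndexError, B raises IndexError
import Mathlib
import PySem

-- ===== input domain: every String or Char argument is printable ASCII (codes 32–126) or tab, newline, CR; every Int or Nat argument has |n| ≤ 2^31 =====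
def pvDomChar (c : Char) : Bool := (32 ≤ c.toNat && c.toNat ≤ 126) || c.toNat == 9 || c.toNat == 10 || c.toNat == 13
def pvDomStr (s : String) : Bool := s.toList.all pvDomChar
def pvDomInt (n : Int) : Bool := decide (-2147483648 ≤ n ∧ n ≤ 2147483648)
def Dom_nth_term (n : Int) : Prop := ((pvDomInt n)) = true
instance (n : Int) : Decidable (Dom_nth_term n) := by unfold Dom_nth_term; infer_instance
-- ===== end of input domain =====

-- B replaces A's incremental while-loop over group sizes by a closed-form inverse
-- triangular-number computation with math.isqrt (objective: alternative algorithm).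

-- string.ascii_lowercase[group - 1], used verbatim by both Pythons;
-- none = IndexError, excluded by Pre_ (the Char becomes a 1-character Python string)
def asciiLetter (group : Int) : String :=
  ((PySem.Str.pyGet? "abcdefghijklmnopqrstuvwxyz" (group - 1)).map
    (fun c => String.ofList [c])).getD ""

-- ===== PORT A =====
-- the while loop of A; fuel only makes it total (never exhausted under Pre_)
def nthLoopA (n : Int) : Nat → Int → Int → Int
  | 0, group, _ => group
  | fuel + 1, group, total =>
      if total + group < n then nthLoopA n fuel (group + 1) (total + group) else group

def nth_term (n : Int) : String :=
  asciiLetter (nthLoopA n 360 1 0)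

-- ===== PORT B =====
-- hand port of math.isqrt (no PySem primitive): halving recursion, exact for every
-- argument m < 4^32 (here m = 8n-7 ≤ 2801 under Pre_); fuel 32 only bounds the halvings
def isqrtF : Nat → Nat → Nat
  | 0, _ => 0
  | f + 1, m =>
      if m = 0 then 0
      else
        let r := 2 * isqrtF f (m / 4)
        if (r + 1) * (r + 1) ≤ m then r + 1 else r

def groupB (n : Int) : Int :=
  if n ≤ 1 then 1
  else PySem.Int.floordiv (1 + (isqrtF 32 (8 * n - 7).toNat : Int)) 2

def nth_term_alt (n : Int) : String :=
  asciiLetter (groupB n)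

-- ===== PRECONDITION & SPEC =====
-- Pre_ excludes n ≥ 352, where A's group exceeds 26 and string.ascii_lowercase[group-1] raises IndexError (B raises there too)
def Pre_nth_term (n : Int) : Prop := n ≤ 351
instance (n : Int) : Decidable (Pre_nth_term n) := by unfold Pre_nth_term; infer_instance
def pvWitness_nth_term : Int := (7)

def Spec_nth_term (n : Int) (out : String) : Prop := out = nth_term_alt n
instance (n : Int) (out : String) : Decidable (Spec_nth_term n out) := by unfold Spec_nth_term; infer_instance

-- ===== CLAIM (what is proved, stated in full; the proofs are below) =====
def Claim_equal_nth_term : Prop := ∀ (n : Int), Dom_nth_term n → Pre_nth_term n → Spec_nth_term n (nth_term n)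

-- ===== LEMMAS AND PROOFS =====

-- for n ≤ 1 the loop body is never entered and B's clamp fires: both groups are 1
theorem group_eq_low (n : Int) (h : n ≤ 1) : nthLoopA n 360 1 0 = groupB n := by
  rw [show (360 : Nat) = 359 + 1 from rfl, nthLoopA, if_neg (by omega), groupB, if_pos h]

-- the finitely many remaining inputs 2 ≤ n ≤ 351, checked by evaluation
set_option maxRecDepth 8192 in
theorem group_eq_mid : ∀ m : Fin 350, nthLoopA ((m : Int) + 2) 360 1 0 = groupB ((m : Int) + 2) := by
  decide

theorem group_eq (n : Int) (hpre : n ≤ 351) : nthLoopA n 360 1 0 = groupB n := by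
  by_cases h : n ≤ 1
  · exact group_eq_low n h
  · have hm : ((⟨(n - 2).toNat, by omega⟩ : Fin 350) : Int) + 2 = n := by simp; omega
    have := group_eq_mid ⟨(n - 2).toNat, by omega⟩
    rwa [hm] at this

-- ===== VERDICT (by name: the statement is the Claim_ definition above) =====
theorem nth_term_spec : Claim_equal_nth_term := by
  intro n _ hpre
  unfold Spec_nth_term nth_term nth_term_alt
  rw [group_eq n hpre]
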